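-- pv_equiv track=rewrite | github.com/craigm26/OpenCastor | castor/specialists/scout.py | _find_frontiers
-- ===== SOURCE A (Python) =====
-- import math
--
-- _GRID_SIZE = 20  # 20x20 cells
--
-- CellState = str  # "free" | "occupied" | "unknown"
--
-- def _neighbours(cell: tuple[int, int]) -> list[tuple[int, int]]:
--     """Return 4-connected neighbours within grid bounds."""
--     r, c = cell
--     result = []
--     for dr, dc in [(-1, 0), (1, 0), (0, -1), (0, 1)]:
--         nr, nc = r + dr, c + dc
--         if 0 <= nr < _GRID_SIZE and 0 <= nc < _GRID_SIZE:
--             result.append((nr, nc))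
--     return result
--
-- def _find_frontiers(
--     grid: dict[tuple[int, int], CellState],
--     robot_cell: tuple[int, int],
-- ) -> list[tuple[int, int]]:
--     """
--     Frontier cells: known-free cells adjacent to at least one unknown cell.
--     Returns sorted by distance from robot_cell (nearest first).
--     """
--     frontiers = []
--     for cell, state in grid.items():
--         if state != "free":
--             continue
--         for nb in _neighbours(cell):
--             if grid.get(nb, "unknown") == "unknown":
--                 frontiers.append(cell)
--                 break
--
--     # Sort by Euclidean distance in grid coords
--     def dist(c: tuple[int, int]) -> float:
--         return math.sqrt((c[0] - robot_cell[0]) ** 2 + (c[1] - robot_cell[1]) ** 2)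
--
--     frontiers.sort(key=dist)
--     return frontiers
-- ===== SOURCE B (Python) =====
-- import math
--
-- _GRID_SIZE = 20
--
-- def _find_frontiers(grid, robot_cell):
--     # Pass 1: from the unknown side — every in-bounds cell that reads 'unknown'
--     # (missing counts as unknown) marks its 4 raw neighbours as frontier candidates.
--     candidates = set()
--     for r in range(_GRID_SIZE):
--         for c in range(_GRID_SIZE):
--             if grid.get((r, c), "unknown") == "unknown":
--                 for dr, dc in [(-1, 0), (1, 0), (0, -1), (0, 1)]:
--                     candidates.add((r + dr, c + dc))
--     # Pass 2: keep the 'free' cells of the grid, in grid insertion order.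
--     frontiers = [cell for cell, state in grid.items()
--                  if state == "free" and cell in candidates]
--     frontiers.sort(key=lambda c: math.sqrt((c[0] - robot_cell[0]) ** 2
--                                            + (c[1] - robot_cell[1]) ** 2))
--     return frontiers
-- ===== Notes on version B (the rewrite author's own statement) =====
-- stated objective: alternative
-- what changed: Reverses the adjacency traversal: instead of scanning each free grid cell's bounded neighbours for an unknown, B scans every in-bounds board position that reads unknown, marks its raw neighbours in a candidate set, then collects the free cells in grid insertion order and sorts by the same distance key.
import Mathlib
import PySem

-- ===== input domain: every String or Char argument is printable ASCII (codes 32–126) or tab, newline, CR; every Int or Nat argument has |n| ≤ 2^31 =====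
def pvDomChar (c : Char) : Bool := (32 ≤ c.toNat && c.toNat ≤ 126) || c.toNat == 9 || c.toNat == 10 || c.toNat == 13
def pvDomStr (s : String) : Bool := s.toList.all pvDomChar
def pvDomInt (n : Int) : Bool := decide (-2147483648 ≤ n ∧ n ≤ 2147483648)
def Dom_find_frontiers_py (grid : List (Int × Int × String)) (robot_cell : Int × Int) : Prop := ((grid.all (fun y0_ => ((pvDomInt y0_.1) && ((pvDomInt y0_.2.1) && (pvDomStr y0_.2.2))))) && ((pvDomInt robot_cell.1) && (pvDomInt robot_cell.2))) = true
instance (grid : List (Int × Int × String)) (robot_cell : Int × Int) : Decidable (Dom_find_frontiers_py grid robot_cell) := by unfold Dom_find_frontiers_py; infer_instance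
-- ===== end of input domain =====

-- B replaces A's free→unknown neighbour scan by a reverse unknown→free pass that builds an
-- explicit candidate set over the 20×20 board, then collects free cells in grid order (alternative
-- decomposition, same cost). Equivalence is about the return value; neither program mutates input.

-- ===== PORT A =====
def pvDeltas : List (Int × Int) := [(-1, 0), (1, 0), (0, -1), (0, 1)]

-- _neighbours: 4-connected neighbours within the 20×20 bounds
def pvNeighbours (cell : Int × Int) : List (Int × Int) :=
  pvDeltas.foldl (fun res d =>
    if 0 ≤ cell.1 + d.1 ∧ cell.1 + d.1 < 20 ∧ 0 ≤ cell.2 + d.2 ∧ cell.2 + d.2 < 20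
    then res ++ [(cell.1 + d.1, cell.2 + d.2)] else res) []

-- exact integer square of the distance; both Pythons feed it to math.sqrt
def pvDist2 (robot c : Int × Int) : Int :=
  (c.1 - robot.1) ^ 2 + (c.2 - robot.2) ^ 2

-- n rounded to 53 significant bits, round-half-to-even: the exact value of the IEEE-754
-- double float(n) for a nonnegative int n (no overflow on this domain)
def pvRnd53 (n : Nat) : Nat :=
  if n < 2 ^ 53 then n
  else
    let k := n.log2 + 1 - 53
    let q := n / 2 ^ k
    let r := n % 2 ^ k
    let h := 2 ^ (k - 1)
    (if r > h ∨ (r = h ∧ q % 2 = 1) then q + 1 else q) * 2 ^ k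

-- exact rational value of the double math.sqrt(float n): correctly-rounded square root of
-- pvRnd53 n, mantissa m in [2^52, 2^53] at binade exponent e (no tie is possible, so the
-- nearest-mantissa choice below is the IEEE round-to-nearest-even result)
def pvSqrtKey (n : Nat) : Rat :=
  if n = 0 then 0
  else
    let v := pvRnd53 n
    let e := v.log2 / 2
    let N := v * 4 ^ (52 - e)
    let s := N.sqrt
    let m := if 2 * (N - s * s) < 2 * s + 1 then s else s + 1
    (m : Rat) / 2 ^ (52 - e)

-- the sort key of both Pythons: dist(c) = math.sqrt((c0-r0)**2 + (c1-r1)**2), as its exact value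
def pvDistKey (robot c : Int × Int) : Rat := pvSqrtKey (pvDist2 robot c).toNat

def find_frontiers_py (grid : List (Int × Int × String)) (robot_cell : Int × Int) : List (Int × Int) :=
  let d := PySem.Dict.ofList (grid.map (fun t => ((t.1, t.2.1), t.2.2)))
  let frontiers := d.items.foldl (fun fr p =>
    if p.2 ≠ "free" then fr
    else if (pvNeighbours p.1).any (fun nb => d.getD nb "unknown" == "unknown")
    then fr ++ [p.1] else fr) []
  PySem.List.sorted frontiers (fun c => pvDistKey robot_cell c) false

-- ===== PORT B =====
def find_frontiers_py_alt (grid : List (Int × Int × String)) (robot_cell : Int × Int) : List (Int × Int) :=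
  let d := PySem.Dict.ofList (grid.map (fun t => ((t.1, t.2.1), t.2.2)))
  let cand : PySem.Set (Int × Int) :=
    (PySem.List.pyRange 0 20 1).foldl (fun s r =>
      (PySem.List.pyRange 0 20 1).foldl (fun s c =>
        if d.getD (r, c) "unknown" == "unknown"
        then pvDeltas.foldl (fun s dd => PySem.Set.add s (r + dd.1, c + dd.2)) s
        else s) s) PySem.Set.empty
  let frontiers := d.items.foldl (fun acc p =>
    if p.2 == "free" && PySem.Set.contains cand p.1 then acc ++ [p.1] else acc) []
  PySem.List.sorted frontiers (fun c => pvDistKey robot_cell c) false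

-- ===== PRECONDITION & SPEC =====
def Spec_find_frontiers_py (grid : List (Int × Int × String)) (robot_cell : Int × Int) (out : List (Int × Int)) : Prop := out = find_frontiers_py_alt grid robot_cell
instance (grid : List (Int × Int × String)) (robot_cell : Int × Int) (out : List (Int × Int)) : Decidable (Spec_find_frontiers_py grid robot_cell out) := by unfold Spec_find_frontiers_py; infer_instance

-- ===== CLAIM (what is proved, stated in full; the proofs are below) =====
def Claim_equal_find_frontiers_py : Prop := ∀ (grid : List (Int × Int × String)) (robot_cell : Int × Int), Dom_find_frontiers_py grid robot_cell → Spec_find_frontiers_py grid robot_cell (find_frontiers_py grid robot_cell)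

-- ===== LEMMAS AND PROOFS =====

-- membership in a fold that conditionally appends one mapped element per step
theorem pv_mem_foldl_append_ite {α β : Type} {l : List α} {acc : List β} {P : α → Prop}
    [DecidablePred P] {f : α → β} {x : β} :
    x ∈ l.foldl (fun res d => if P d then res ++ [f d] else res) acc ↔
      x ∈ acc ∨ ∃ d ∈ l, P d ∧ x = f d := by
  induction l generalizing acc with
  | nil => simp
  | cons a l ih =>
    simp only [List.foldl_cons, ih, List.mem_cons]
    by_cases h : P a
    · simp [h]; aesop
    · simp [h]

-- membership through a fold whose step's membership is characterised pointwise
theorem pv_mem_foldl_step {α β : Type} {l : List α} {s : List β} {x : β}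
    (g : List β → α → List β) (Q : α → β → Prop)
    (h : ∀ (s : List β) (r : α) (x : β), x ∈ g s r ↔ x ∈ s ∨ Q r x) :
    x ∈ l.foldl g s ↔ x ∈ s ∨ ∃ r ∈ l, Q r x := by
  induction l generalizing s with
  | nil => simp
  | cons a l ih => simp only [List.foldl_cons, ih, h, List.mem_cons]; aesop

-- membership in the delta-adding fold
theorem pv_mem_foldl_add {s : List (Int × Int)} {r c : Int} {x : Int × Int} :
    x ∈ pvDeltas.foldl (fun s dd => PySem.Set.add s (r + dd.1, c + dd.2)) s ↔
      x ∈ s ∨ ∃ dd ∈ pvDeltas, x = (r + dd.1, c + dd.2) := by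
  have := pv_mem_foldl_step (l := pvDeltas) (s := s) (x := x)
    (fun s dd => PySem.Set.add s (r + dd.1, c + dd.2))
    (fun dd x => x = (r + dd.1, c + dd.2))
    (fun s dd x => by simp [PySem.Set.mem_add])
  exact this

-- the candidate set of B contains exactly the raw neighbours of in-bounds unknown cells
theorem pv_mem_cand (d : PySem.Dict (Int × Int) String) (x : Int × Int) :
    x ∈ (PySem.List.pyRange 0 20 1).foldl (fun s r =>
          (PySem.List.pyRange 0 20 1).foldl (fun s c =>
            if d.getD (r, c) "unknown" == "unknown"
            then pvDeltas.foldl (fun s dd => PySem.Set.add s (r + dd.1, c + dd.2)) s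
            else s) s) PySem.Set.empty ↔
      ∃ r, 0 ≤ r ∧ r < 20 ∧ ∃ c, 0 ≤ c ∧ c < 20 ∧
        d.getD (r, c) "unknown" = "unknown" ∧ ∃ dd ∈ pvDeltas, x = (r + dd.1, c + dd.2) := by
  rw [pv_mem_foldl_step _ (fun r x => ∃ c ∈ PySem.List.pyRange 0 20 1,
        d.getD (r, c) "unknown" = "unknown" ∧ ∃ dd ∈ pvDeltas, x = (r + dd.1, c + dd.2))]
  · simp only [PySem.Set.empty, List.not_mem_nil, false_or, PySem.List.mem_pyRange_one]
    constructor
    · rintro ⟨r, ⟨h1, h2⟩, c, ⟨h3, h4⟩, h⟩; exact ⟨r, h1, h2, c, h3, h4, h⟩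
    · rintro ⟨r, h1, h2, c, h3, h4, h⟩; exact ⟨r, ⟨h1, h2⟩, c, ⟨h3, h4⟩, h⟩
  · intro s r x
    rw [pv_mem_foldl_step _ (fun c x =>
          d.getD (r, c) "unknown" = "unknown" ∧ ∃ dd ∈ pvDeltas, x = (r + dd.1, c + dd.2))]
    intro s c x
    by_cases h : d.getD (r, c) "unknown" = "unknown"
    · simp [h, pv_mem_foldl_add]
    · simp [h]

-- members of _neighbours cell
theorem pv_mem_neighbours (cell nb : Int × Int) :
    nb ∈ pvNeighbours cell ↔ ∃ dd ∈ pvDeltas,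
      (0 ≤ cell.1 + dd.1 ∧ cell.1 + dd.1 < 20 ∧ 0 ≤ cell.2 + dd.2 ∧ cell.2 + dd.2 < 20) ∧
      nb = (cell.1 + dd.1, cell.2 + dd.2) := by
  unfold pvNeighbours
  rw [pv_mem_foldl_append_ite]
  simp

-- the two frontier tests agree on every cell
theorem pv_cond_eq (d : PySem.Dict (Int × Int) String) (cell : Int × Int) :
    ((pvNeighbours cell).any (fun nb => d.getD nb "unknown" == "unknown")) =
    PySem.Set.contains ((PySem.List.pyRange 0 20 1).foldl (fun s r =>
          (PySem.List.pyRange 0 20 1).foldl (fun s c =>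
            if d.getD (r, c) "unknown" == "unknown"
            then pvDeltas.foldl (fun s dd => PySem.Set.add s (r + dd.1, c + dd.2)) s
            else s) s) PySem.Set.empty) cell := by
  rw [Bool.eq_iff_iff]
  rw [List.any_eq_true]
  rw [PySem.Set.contains_iff, pv_mem_cand]
  constructor
  · rintro ⟨nb, hnb, hu⟩
    rw [pv_mem_neighbours] at hnb
    obtain ⟨dd, hdd, ⟨b1, b2, b3, b4⟩, rfl⟩ := hnb
    refine ⟨cell.1 + dd.1, b1, b2, cell.2 + dd.2, b3, b4, by simpa using hu, (-dd.1, -dd.2), ?_, ?_⟩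
    · fin_cases hdd <;> decide
    · simp; try omega
  · rintro ⟨r, h1, h2, c, h3, h4, hu, dd, hdd, rfl⟩
    refine ⟨(r, c), ?_, by simpa using hu⟩
    rw [pv_mem_neighbours]
    refine ⟨(-dd.1, -dd.2), ?_, ?_, ?_⟩
    · fin_cases hdd <;> decide
    · simp; try omega
    · simp; try omega

-- ===== VERDICT (by name: the statement is the Claim_ definition above) =====
theorem find_frontiers_py_spec : Claim_equal_find_frontiers_py := by
  intro grid robot_cell _
  unfold Spec_find_frontiers_py find_frontiers_py find_frontiers_py_alt
  dsimp only
  congr 1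
  apply PySem.List.foldl_congr_mem
  intro acc p hp
  rw [← pv_cond_eq]
  by_cases h : p.2 = "free"
  · obtain ⟨c, st⟩ := p
    simp only at h
    subst h
    dsimp only
    rw [if_neg (fun hne => hne rfl)]
    have : (("free" : String) == "free") = true := by decide
    rw [this, Bool.true_and]
  · simp [h]
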